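-- pv_equiv track=rewrite | github.com/Instein98/Automatic-Repair-for-CUDA-Synchronization-Bugs | structures.py | formatAST
-- ===== SOURCE A (Python) =====
-- def formatAST(unformattedAST):
--     tempList = list(str(unformattedAST[0]))
--     braceCount = -1;
--     for index, char in enumerate(tempList):
--         if char == '\n':
--             tempList.insert(index+1, (braceCount * '    ') if braceCount > 0 else '')
--         elif char == '{':
--             braceCount += 1
--         elif char == '}':
--             braceCount -= 1
--     return "".join(tempList)
-- ===== SOURCE B (Python) =====
-- def formatAST(unformattedAST):
--     lines = str(unformattedAST[0]).split('\n')
--     out = [lines[0]]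
--     braceCount = -1 + lines[0].count('{') - lines[0].count('}')
--     for line in lines[1:]:
--         out.append('\n')
--         if braceCount > 0:
--             out.append(braceCount * '    ')
--         out.append(line)
--         braceCount += line.count('{') - line.count('}')
--     return ''.join(out)
-- ===== Notes on version B (the rewrite author's own statement) =====
-- stated objective: alternative
-- what changed: A mutates the character list in place while enumerating it (inserting indent strings after each newline, guided by a running brace counter); B instead splits the text into lines once, tracks a per-line brace delta via str.count, and joins the lines back with '\n' plus the computed indentation.
import Mathlib
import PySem

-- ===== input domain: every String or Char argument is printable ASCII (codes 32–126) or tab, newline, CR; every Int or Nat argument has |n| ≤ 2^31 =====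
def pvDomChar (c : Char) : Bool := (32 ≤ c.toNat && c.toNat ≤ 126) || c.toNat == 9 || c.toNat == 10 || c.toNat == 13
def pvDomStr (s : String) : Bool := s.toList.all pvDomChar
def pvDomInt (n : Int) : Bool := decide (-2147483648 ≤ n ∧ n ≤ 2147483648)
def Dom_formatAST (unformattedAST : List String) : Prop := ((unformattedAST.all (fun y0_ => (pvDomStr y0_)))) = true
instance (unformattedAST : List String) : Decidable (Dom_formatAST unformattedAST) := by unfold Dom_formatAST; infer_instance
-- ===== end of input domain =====

-- B replaces A's insert-while-enumerating single pass by a split-into-lines pass with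
-- per-line brace deltas (objective: alternative decomposition, same result).

-- ===== PORT A =====

-- braceCount * '    '  (Python string repetition; empty for braceCount ≤ 0 handled at call sites)
def pvIndent (bc : Int) : List Char := (List.replicate bc.toNat "    ".toList).flatten

-- every character of an inserted indent string is a space
theorem mem_pvIndent (bc : Int) (x : Char) (h : x ∈ pvIndent bc) : x = ' ' := by
  simp only [pvIndent, List.mem_flatten] at h
  obtain ⟨l, hl, hmem⟩ := h
  have := List.eq_of_mem_replicate hl
  subst this
  rw [show "    ".toList = [' ', ' ', ' ', ' '] from rfl] at hmem
  simp at hmem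
  exact hmem

theorem indentIf_ne (bc : Int) (c : Char) (hc : c ≠ ' ') :
    (if bc > 0 then pvIndent bc else []) ≠ [c] := by
  split
  · intro hcon
    have : c ∈ pvIndent bc := by rw [hcon]; simp
    exact absurd (mem_pvIndent bc c this) hc
  · simp

-- termination lemmas for fmtLoopA (cited by name in decreasing_by)
theorem fmtLoopA_dec_nl (temp : List (List Char)) (i : Nat) (v : List Char)
    (h : i < temp.length) (hc : temp[i] = ['\n']) (hv : v ≠ ['\n']) :
    2 * ((PySem.List.insert temp ((i + 1 : Nat) : Int) v).drop (i + 1)).countP (· = ['\n'])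
        + ((PySem.List.insert temp ((i + 1 : Nat) : Int) v).length - (i + 1))
      < 2 * (temp.drop i).countP (· = ['\n']) + (temp.length - i) := by
  have htlen : (temp.take (i + 1)).length = i + 1 := List.length_take_of_le (by omega)
  have hins : PySem.List.insert temp ((i + 1 : Nat) : Int) v =
      temp.take (i + 1) ++ v :: temp.drop (i + 1) :=
    PySem.List.insert_natCast temp (i + 1) _ (by omega)
  have hdrop : (PySem.List.insert temp ((i + 1 : Nat) : Int) v).drop (i + 1) =
      v :: temp.drop (i + 1) := by rw [hins]; exact List.drop_left' htlen
  have hlen : (PySem.List.insert temp ((i + 1 : Nat) : Int) v).length = temp.length + 1 := by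
    rw [hins]; simp
  have hd : temp.drop i = temp[i] :: temp.drop (i + 1) := List.drop_eq_getElem_cons h
  rw [hdrop, hlen, hd, List.countP_cons, List.countP_cons]
  have h1 : (decide (v = ['\n'])) = false := by simp [hv]
  have h2 : (decide (temp[i] = ['\n'])) = true := decide_eq_true hc
  rw [h1, h2]
  have e1 : (if (false = true) then 1 else 0) = 0 := rfl
  have e2 : (if (true = true) then 1 else 0) = 1 := rfl
  rw [e1, e2]
  omega

theorem fmtLoopA_dec_step (temp : List (List Char)) (i : Nat) (h : i < temp.length) :
    2 * (temp.drop (i + 1)).countP (· = ['\n']) + (temp.length - (i + 1))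
      < 2 * (temp.drop i).countP (· = ['\n']) + (temp.length - i) := by
  have hd : temp.drop i = temp[i] :: temp.drop (i + 1) := List.drop_eq_getElem_cons h
  rw [hd, List.countP_cons]
  split <;> omega

-- the enumerate loop of A: tempList is a Python list of strings (initially singleton chars);
-- the iterator keeps yielding elements by increasing index as long as the (growing) list has them.
def fmtLoopA (temp : List (List Char)) (i : Nat) (bc : Int) : List (List Char) :=
  if h : i < temp.length then
    let c := temp[i]
    if hc : c = ['\n'] then
      fmtLoopA (PySem.List.insert temp ((i + 1 : Nat) : Int)
                  (if bc > 0 then pvIndent bc else [])) (i + 1) bc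
    else if c = ['{'] then fmtLoopA temp (i + 1) (bc + 1)
    else if c = ['}'] then fmtLoopA temp (i + 1) (bc - 1)
    else fmtLoopA temp (i + 1) bc
  else temp
termination_by 2 * (temp.drop i).countP (· = ['\n']) + (temp.length - i)
decreasing_by
  · exact fmtLoopA_dec_nl temp i _ h hc (indentIf_ne bc '\n' (by decide))
  all_goals exact fmtLoopA_dec_step temp i h

def formatAST (unformattedAST : List String) : String :=
  -- unformattedAST[0] (IndexError on [] — excluded by Pre_); str() of a string is the string itself
  let s := ((PySem.List.pyGet? unformattedAST 0).getD "").toList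
  let tempList := s.map (fun c => [c])
  String.ofList (PySem.Chars.join [] (fmtLoopA tempList 0 (-1)))

-- ===== PORT B =====

-- line.count('{') - line.count('}')
def pvDeltaB (line : List Char) : Int :=
  (PySem.Chars.count line ['{'] : Int) - (PySem.Chars.count line ['}'] : Int)

-- the body of B's for-loop: out-so-far and braceCount
def fmtStepB (acc : List Char × Int) (line : List Char) : List Char × Int :=
  (acc.1 ++ '\n' :: ((if acc.2 > 0 then pvIndent acc.2 else []) ++ line),
   acc.2 + pvDeltaB line)

def formatAST_alt (unformattedAST : List String) : String :=
  let s := ((PySem.List.pyGet? unformattedAST 0).getD "").toList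
  match PySem.Chars.splitOn s ['\n'] with
  | [] => ""  -- unreachable: str.split never returns an empty list
  | l0 :: rest =>
      String.ofList (rest.foldl fmtStepB (l0, -1 + pvDeltaB l0)).1

-- ===== PRECONDITION & SPEC =====
-- Pre_ excludes only the empty list, on which A raises IndexError (unformattedAST[0]).
def Pre_formatAST (unformattedAST : List String) : Prop := unformattedAST ≠ []
instance (unformattedAST : List String) : Decidable (Pre_formatAST unformattedAST) := by
  unfold Pre_formatAST; infer_instance

def pvWitness_formatAST : List String := ["if (x) {\ny = 1;\n{\nz;\n}\n}"]

def Spec_formatAST (unformattedAST : List String) (out : String) : Prop := out = formatAST_alt unformattedAST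
instance (unformattedAST : List String) (out : String) : Decidable (Spec_formatAST unformattedAST out) := by unfold Spec_formatAST; infer_instance

-- ===== CLAIM (what is proved, stated in full; the proofs are below) =====
def Claim_equal_formatAST : Prop := ∀ (unformattedAST : List String), Dom_formatAST unformattedAST → Pre_formatAST unformattedAST → Spec_formatAST unformattedAST (formatAST unformattedAST)

-- ===== LEMMAS AND PROOFS =====

-- proof-side reference function: one char-by-char pass, indentation after each newline
def specF : List Char → Int → List Char
  | [], _ => []
  | c :: cs, bc =>
    if c = '\n' then '\n' :: ((if bc > 0 then pvIndent bc else []) ++ specF cs bc)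
    else if c = '{' then c :: specF cs (bc + 1)
    else if c = '}' then c :: specF cs (bc - 1)
    else c :: specF cs bc

-- proof-side split on '\n'
def splitNL : List Char → List (List Char)
  | [] => [[]]
  | c :: r =>
    if c = '\n' then [] :: splitNL r
    else match splitNL r with
         | [] => [[c]]
         | h :: t => (c :: h) :: t

theorem splitNL_ne_nil (cs : List Char) : splitNL cs ≠ [] := by
  cases cs with
  | nil => simp [splitNL]
  | cons c r =>
    simp only [splitNL]
    split
    · simp
    · split <;> simp

-- head-prefixing helper for the split characterization
def consHead (pre : List Char) : List (List Char) → List (List Char)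
  | [] => [pre]
  | h :: t => (pre ++ h) :: t

theorem consHead_nil (ls : List (List Char)) (h : ls ≠ []) : consHead [] ls = ls := by
  cases ls with
  | nil => exact absurd rfl h
  | cons a t => simp [consHead]

theorem splitOn_go_eq (fuel : Nat) : ∀ (l cur : List Char) (acc : List (List Char)),
    l.length < fuel →
    PySem.Chars.splitOn.go ['\n'] fuel l cur acc = acc.reverse ++ consHead cur.reverse (splitNL l) := by
  induction fuel with
  | zero => intro l cur acc h; omega
  | succ f ih =>
    intro l cur acc h
    cases l with
    | nil =>
      simp [PySem.Chars.splitOn.go, splitNL, consHead]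
    | cons c rest =>
      by_cases hc : c = '\n'
      · subst hc
        have hpre : List.isPrefixOf ['\n'] ('\n' :: rest) = true := by
          simp [List.isPrefixOf]
        rw [PySem.Chars.splitOn.go]
        rw [if_pos hpre]
        simp only [List.length_singleton, List.drop_one, List.tail_cons]
        rw [ih rest [] (cur.reverse :: acc) (by simpa using Nat.lt_of_succ_lt_succ h)]
        have h2 : splitNL ('\n' :: rest) = [] :: splitNL rest := by simp [splitNL]
        rw [h2, List.reverse_nil, consHead_nil _ (splitNL_ne_nil rest)]
        cases hsp : splitNL rest with
        | nil => exact absurd hsp (splitNL_ne_nil rest)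
        | cons hh tt => simp [consHead]
      · have hpre : List.isPrefixOf ['\n'] (c :: rest) = false := by
          simp [List.isPrefixOf]
          intro hcon
          exact absurd hcon.symm hc
        rw [PySem.Chars.splitOn.go]
        rw [if_neg (by simp [hpre])]
        rw [ih rest (c :: cur) acc (by simpa using Nat.lt_of_succ_lt_succ h)]
        have : splitNL (c :: rest) = consHead [c] (splitNL rest) := by
          simp only [splitNL, if_neg hc]
          cases hsp : splitNL rest with
          | nil => simp [consHead]
          | cons hh tt => simp [consHead]
        rw [this]
        cases hsp : splitNL rest with
        | nil => exact absurd hsp (splitNL_ne_nil rest)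
        | cons hh tt => simp [consHead]

theorem splitOn_eq_splitNL (s : List Char) : PySem.Chars.splitOn s ['\n'] = splitNL s := by
  show PySem.Chars.splitOn.go ['\n'] (s.length + 1) s [] [] = splitNL s
  rw [splitOn_go_eq (s.length + 1) s [] [] (by omega)]
  simp [consHead_nil _ (splitNL_ne_nil s)]

theorem count_go_eq (a : Char) (fuel : Nat) : ∀ (l : List Char) (acc : Nat),
    l.length ≤ fuel → PySem.Chars.count.go [a] fuel l acc = acc + l.count a := by
  induction fuel with
  | zero =>
    intro l acc h
    have : l = [] := List.length_eq_zero_iff.mp (by omega)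
    subst this
    simp [PySem.Chars.count.go]
  | succ f ih =>
    intro l acc h
    cases l with
    | nil => simp [PySem.Chars.count.go]
    | cons c rest =>
      by_cases hc : c = a
      · subst hc
        have hpre : List.isPrefixOf [c] (c :: rest) = true := by simp [List.isPrefixOf]
        rw [PySem.Chars.count.go]
        rw [if_pos hpre]
        simp only [List.length_singleton, List.drop_one, List.tail_cons]
        rw [ih rest (acc + 1) (by simpa using Nat.le_of_succ_le_succ h)]
        rw [List.count_cons_self]
        omega
      · have hpre : List.isPrefixOf [a] (c :: rest) = false := by
          simp [List.isPrefixOf]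
          intro hcon
          exact absurd hcon.symm hc
        rw [PySem.Chars.count.go]
        rw [if_neg (by simp [hpre])]
        rw [ih rest acc (by simpa using Nat.le_of_succ_le_succ h)]
        rw [List.count_cons_of_ne hc]

theorem count_singleton_char (l : List Char) (a : Char) :
    PySem.Chars.count l [a] = l.count a := by
  show (if ([a] : List Char).isEmpty = true then l.length + 1 else PySem.Chars.count.go [a] l.length l 0) = l.count a
  rw [if_neg (by simp)]
  rw [count_go_eq a l.length l 0 (le_refl _)]
  simp

-- per-char brace delta and its sum over a line
def dchar (c : Char) : Int := if c = '{' then 1 else if c = '}' then -1 else 0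

def dsum : List Char → Int
  | [] => 0
  | c :: r => dchar c + dsum r

theorem pvDeltaB_eq_dsum (l : List Char) : pvDeltaB l = dsum l := by
  induction l with
  | nil => simp [pvDeltaB, count_singleton_char, dsum]
  | cons c r ih =>
    simp only [pvDeltaB, count_singleton_char] at ih ⊢
    simp only [dsum, dchar]
    by_cases h1 : c = '{'
    · subst h1
      rw [List.count_cons_self, List.count_cons_of_ne (by decide), if_pos rfl]
      push_cast
      omega
    · by_cases h2 : c = '}'
      · subst h2
        rw [List.count_cons_of_ne (by decide), List.count_cons_self,
            if_neg (by decide), if_pos rfl]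
        push_cast
        omega
      · rw [List.count_cons_of_ne h1, List.count_cons_of_ne h2, if_neg h1, if_neg h2]
        omega

-- B's loop, recursively: the text emitted for the lines after the first
def emitRest : List (List Char) → Int → List Char
  | [], _ => []
  | l :: ls, bc => '\n' :: ((if bc > 0 then pvIndent bc else []) ++ (l ++ emitRest ls (bc + dsum l)))

def emitAll : List (List Char) → Int → List Char
  | [], _ => []
  | l :: ls, bc => l ++ emitRest ls (bc + dsum l)

theorem foldB (ls : List (List Char)) : ∀ (acc : List Char) (bc : Int),
    (ls.foldl fmtStepB (acc, bc)).1 = acc ++ emitRest ls bc := by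
  induction ls with
  | nil => intro acc bc; simp [emitRest]
  | cons l ls ih =>
    intro acc bc
    simp only [List.foldl_cons, fmtStepB, emitRest, pvDeltaB_eq_dsum]
    rw [ih]
    simp

theorem emitRest_eq_emitAll (ls : List (List Char)) (bc : Int) (h : ls ≠ []) :
    emitRest ls bc = '\n' :: ((if bc > 0 then pvIndent bc else []) ++ emitAll ls bc) := by
  cases ls with
  | nil => exact absurd rfl h
  | cons l t => simp [emitRest, emitAll]

theorem specF_eq_emitAll (cs : List Char) : ∀ (bc : Int),
    specF cs bc = emitAll (splitNL cs) bc := by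
  induction cs with
  | nil => intro bc; simp [specF, splitNL, emitAll, emitRest]
  | cons c r ih =>
    intro bc
    by_cases hc : c = '\n'
    · subst hc
      have hl : splitNL ('\n' :: r) = [] :: splitNL r := by simp [splitNL]
      have hsF : specF ('\n' :: r) bc
          = '\n' :: ((if bc > 0 then pvIndent bc else []) ++ specF r bc) := by simp [specF]
      rw [hsF, hl, ih bc]
      have h1 : emitAll ([] :: splitNL r) bc = emitRest (splitNL r) bc := by
        simp [emitAll, dsum]
      rw [h1, emitRest_eq_emitAll _ _ (splitNL_ne_nil r)]
    · cases hsp : splitNL r with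
      | nil => exact absurd hsp (splitNL_ne_nil r)
      | cons hh tt =>
        have hsplit : splitNL (c :: r) = (c :: hh) :: tt := by
          simp only [splitNL, if_neg hc, hsp]
        rw [hsplit]
        have hspec : specF (c :: r) bc = c :: specF r (bc + dchar c) := by
          simp only [specF, dchar, if_neg hc]
          split_ifs <;> simp_all [sub_eq_add_neg]
        rw [hspec, ih (bc + dchar c), hsp]
        simp only [emitAll, dsum]
        simp [add_assoc]

-- every character of an inserted indent string is a space
theorem fmtLoopA_eq (cs : List Char) : ∀ (pre : List (List Char)) (bc : Int),
    (fmtLoopA (pre ++ cs.map (fun c => [c])) pre.length bc).flatten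
      = pre.flatten ++ specF cs bc := by
  induction cs with
  | nil =>
    intro pre bc
    rw [fmtLoopA]
    simp [specF]
  | cons c r ih =>
    intro pre bc
    have hlen : pre.length < (pre ++ (c :: r).map (fun c => [c])).length := by simp
    have hget : (pre ++ (c :: r).map (fun c => [c]))[pre.length]'hlen = [c] := by
      rw [List.getElem_append_right (le_refl pre.length)]
      simp
    rw [fmtLoopA, dif_pos hlen]
    simp only [hget]
    by_cases hc : c = '\n'
    · subst hc
      rw [dif_pos rfl]
      set v := (if bc > 0 then pvIndent bc else []) with hv
      have hsplit : pre ++ ('\n' :: r).map (fun c => [c])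
          = (pre ++ [['\n']]) ++ r.map (fun c => [c]) := by simp
      have hlenp : (pre ++ [['\n']]).length = pre.length + 1 := by simp
      have hins : PySem.List.insert (pre ++ ('\n' :: r).map (fun c => [c]))
          ((pre.length + 1 : Nat) : Int) v
          = (pre ++ [['\n']]) ++ v :: r.map (fun c => [c]) := by
        rw [PySem.List.insert_natCast _ _ _ (by simp)]
        rw [hsplit, List.take_left' hlenp, List.drop_left' hlenp]
      rw [hins]
      have hlen2 : pre.length + 1 < ((pre ++ [['\n']]) ++ v :: r.map (fun c => [c])).length := by
        simp
      have hget2 : ((pre ++ [['\n']]) ++ v :: r.map (fun c => [c]))[pre.length + 1]'hlen2 = v := by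
        rw [List.getElem_append_right (by simp : (pre ++ [['\n']]).length ≤ pre.length + 1)]
        simp [hlenp]
      rw [fmtLoopA, dif_pos hlen2]
      simp only [hget2]
      rw [dif_neg (indentIf_ne bc '\n' (by decide)),
          if_neg (indentIf_ne bc '{' (by decide)),
          if_neg (indentIf_ne bc '}' (by decide))]
      have hre : (pre ++ [['\n']]) ++ v :: r.map (fun c => [c])
          = (pre ++ [['\n'], v]) ++ r.map (fun c => [c]) := by simp
      have hlenq : pre.length + 1 + 1 = (pre ++ [['\n'], v]).length := by simp
      rw [hre, hlenq, ih (pre ++ [['\n'], v]) bc]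
      have hspec : specF ('\n' :: r) bc = '\n' :: (v ++ specF r bc) := by
        simp [specF, hv]
      rw [hspec]
      simp
    · have hcne : ¬ ([c] = ['\n']) := by simp [hc]
      rw [dif_neg hcne]
      by_cases h1 : c = '{'
      · subst h1
        rw [if_pos rfl]
        have hre : pre ++ ('{' :: r).map (fun c => [c])
            = (pre ++ [['{']]) ++ r.map (fun c => [c]) := by simp
        have hlenq : pre.length + 1 = (pre ++ [['{']]).length := by simp
        rw [hre, hlenq, ih (pre ++ [['{']]) (bc + 1)]
        have hspec : specF ('{' :: r) bc = '{' :: specF r (bc + 1) := by simp [specF]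
        rw [hspec]
        simp
      · have h1ne : ¬ ([c] = ['{']) := by simp [h1]
        rw [if_neg h1ne]
        by_cases h2 : c = '}'
        · subst h2
          rw [if_pos rfl]
          have hre : pre ++ ('}' :: r).map (fun c => [c])
              = (pre ++ [['}']]) ++ r.map (fun c => [c]) := by simp
          have hlenq : pre.length + 1 = (pre ++ [['}']]).length := by simp
          rw [hre, hlenq, ih (pre ++ [['}']]) (bc - 1)]
          have hspec : specF ('}' :: r) bc = '}' :: specF r (bc - 1) := by simp [specF]
          rw [hspec]
          simp
        · have h2ne : ¬ ([c] = ['}']) := by simp [h2]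
          rw [if_neg h2ne]
          have hre : pre ++ (c :: r).map (fun x => [x])
              = (pre ++ [[c]]) ++ r.map (fun x => [x]) := by simp
          have hlenq : pre.length + 1 = (pre ++ [[c]]).length := by simp
          rw [hre, hlenq, ih (pre ++ [[c]]) bc]
          have hspec : specF (c :: r) bc = c :: specF r bc := by
            simp [specF, hc, h1, h2]
          rw [hspec]
          simp

theorem join_nil_eq_flatten (parts : List (List Char)) :
    PySem.Chars.join [] parts = parts.flatten := by
  show List.intercalate [] parts = parts.flatten
  induction parts with
  | nil => simp [List.intercalate]
  | cons p ps ih =>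
    cases ps with
    | nil => simp [List.intercalate]
    | cons q qs =>
      simp only [List.intercalate, List.intersperse] at *
      simp_all

-- ===== VERDICT (by name: the statement is the Claim_ definition above) =====
theorem formatAST_spec : Claim_equal_formatAST := by
  intro u _ _
  show formatAST u = formatAST_alt u
  set s := ((PySem.List.pyGet? u 0).getD "").toList with hs
  show String.ofList (PySem.Chars.join [] (fmtLoopA (s.map (fun c => [c])) 0 (-1)))
      = (match PySem.Chars.splitOn s ['\n'] with
         | [] => ("" : String)
         | l0 :: rest => String.ofList (rest.foldl fmtStepB (l0, -1 + pvDeltaB l0)).1)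
  rw [splitOn_eq_splitNL s, join_nil_eq_flatten]
  have hA : (fmtLoopA (s.map (fun c => [c])) 0 (-1)).flatten = specF s (-1) := by
    have := fmtLoopA_eq s [] (-1)
    simpa using this
  cases hsp : splitNL s with
  | nil => exact absurd hsp (splitNL_ne_nil s)
  | cons l0 rest =>
    show String.ofList (fmtLoopA (s.map (fun c => [c])) 0 (-1)).flatten
        = String.ofList (rest.foldl fmtStepB (l0, -1 + pvDeltaB l0)).1
    rw [hA, foldB rest l0 (-1 + pvDeltaB l0), specF_eq_emitAll s (-1), hsp,
        pvDeltaB_eq_dsum]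
    simp [emitAll]
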